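-- pv_equiv track=rewrite | github.com/heroapoorva/Novelty-detection | clean.py | make_parseable
-- ===== SOURCE A (Python) =====
-- def make_parseable(t):
--     output=""
--     i=0
--     seen=0
--     while(i<len(t)):
--         if(t[i]=='"'):
--             if(t[i:i+8]=='"url": "'):
--                 output=output+ '"url": "'
--                 i=i+8
--             elif(t[i:i+13]=='", "title": "'):
--                 output=output+'", "title": "'
--                 i=i+13
--             elif(t[i:i+11]=='", "dop": "'):
--                 output=output+'", "dop": "'
--                 i=i+11
--             elif(t[i:i+12]=='", "text": "'):
--                 output=output+'", "text": "'
--                 i=i+12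
--             elif(t[i:i+3]=='" }'):
--                 output=output+'" }'
--                 i=i+3
--             else:
--                 i=i+1
--         elif(t[i]=='\\'):
--             i=i+1
--         else:
--             output=output+t[i]
--             i=i+1
--     return output
-- ===== SOURCE B (Python) =====
-- # Table-driven prefix scanner: consume the string front-to-back, keeping whole
-- # markers from a table and dropping stray backslashes/quotes; pieces are joined once.
-- MARKERS = ('"url": "', '", "title": "', '", "dop": "', '", "text": "', '" }')
--
-- def make_parseable(t):
--     out = []
--     rest = t
--     while rest:
--         for m in MARKERS:
--             if rest.startswith(m):
--                 out.append(m)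
--                 rest = rest[len(m):]
--                 break
--         else:
--             c = rest[0]
--             if c not in '\\"':
--                 out.append(c)
--             rest = rest[1:]
--     return ''.join(out)
-- ===== Notes on version B (the rewrite author's own statement) =====
-- stated objective: simpler
-- what changed: Replaced A's index-arithmetic while loop with a hard-coded five-way slice-comparison if-chain by a table-driven scanner that consumes the remaining suffix, looks the marker up in a tuple via startswith, collects pieces in a list and joins once.
import Mathlib
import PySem

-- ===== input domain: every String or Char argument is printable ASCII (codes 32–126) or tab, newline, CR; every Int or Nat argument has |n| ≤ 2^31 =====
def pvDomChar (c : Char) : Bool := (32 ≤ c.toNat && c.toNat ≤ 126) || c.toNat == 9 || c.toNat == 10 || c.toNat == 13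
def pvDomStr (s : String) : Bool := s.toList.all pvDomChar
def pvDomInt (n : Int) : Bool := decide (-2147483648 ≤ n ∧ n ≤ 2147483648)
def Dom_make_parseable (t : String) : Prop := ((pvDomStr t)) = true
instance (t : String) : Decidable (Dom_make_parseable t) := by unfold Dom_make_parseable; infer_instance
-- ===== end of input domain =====

-- B replaces A's hard-coded index/slice if-chain by a table-driven prefix scanner that
-- consumes the string front-to-back (objective: simpler). Return value only; no mutation.

-- ===== PORT A =====
-- the five marker literals A compares its slices with
def pvM1 : List Char := "\"url\": \"".toList
def pvM2 : List Char := "\", \"title\": \"".toList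
def pvM3 : List Char := "\", \"dop\": \"".toList
def pvM4 : List Char := "\", \"text\": \"".toList
def pvM5 : List Char := "\" }".toList

-- A's while loop; Python's slice t[i:i+k] for 0 ≤ i, 0 ≤ k is exactly (t.drop i).take k.
-- The loop is run on fuel t.length: every iteration advances i by at least 1, so the fuel
-- is never exhausted before the loop condition i < len(t) fails.
def make_parseable_go : Nat → List Char → Nat → List Char → List Char
  | 0, _, _, output => output
  | fuel+1, t, i, output =>
    if h : i < t.length then
      if t[i] = '"' then
        if (t.drop i).take 8 = pvM1 then make_parseable_go fuel t (i+8) (output ++ pvM1)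
        else if (t.drop i).take 13 = pvM2 then make_parseable_go fuel t (i+13) (output ++ pvM2)
        else if (t.drop i).take 11 = pvM3 then make_parseable_go fuel t (i+11) (output ++ pvM3)
        else if (t.drop i).take 12 = pvM4 then make_parseable_go fuel t (i+12) (output ++ pvM4)
        else if (t.drop i).take 3 = pvM5 then make_parseable_go fuel t (i+3) (output ++ pvM5)
        else make_parseable_go fuel t (i+1) output
      else if t[i] = '\\' then make_parseable_go fuel t (i+1) output
      else make_parseable_go fuel t (i+1) (output ++ [t[i]])
    else output

def make_parseable (t : String) : String :=
  String.ofList (make_parseable_go t.toList.length t.toList 0 [])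

-- ===== PORT B =====
def pvMarkers : List (List Char) := [pvM1, pvM2, pvM3, pvM4, pvM5]

-- the `for m in MARKERS: if rest.startswith(m)` search
def pvFindMarker (r : List Char) : Option (List Char) :=
  pvMarkers.find? (fun m => m.isPrefixOf r)

-- the `while rest:` loop as recursion on the remaining suffix, on fuel len(rest)
-- (each step strips at least one character, so the fuel is never exhausted first)
def pvAltGo : Nat → List Char → List Char
  | _, [] => []
  | 0, _ :: _ => []
  | fuel+1, c :: cs =>
    match pvFindMarker (c :: cs) with
    | some m => m ++ pvAltGo fuel ((c :: cs).drop m.length)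
    | none => (if c = '\\' ∨ c = '"' then [] else [c]) ++ pvAltGo fuel cs

def make_parseable_alt (t : String) : String :=
  String.ofList (pvAltGo t.toList.length t.toList)

-- ===== PRECONDITION & SPEC =====
def Spec_make_parseable (t : String) (out : String) : Prop := out = make_parseable_alt t
instance (t : String) (out : String) : Decidable (Spec_make_parseable t out) := by unfold Spec_make_parseable; infer_instance

-- ===== CLAIM (what is proved, stated in full; the proofs are below) =====
def Claim_equal_make_parseable : Prop := ∀ (t : String), Dom_make_parseable t → Spec_make_parseable t (make_parseable t)

-- ===== LEMMAS AND PROOFS =====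

-- every found marker is one of the five, hence nonempty
theorem pvFindMarker_pos {r m : List Char} (h : pvFindMarker r = some m) : 0 < m.length := by
  have hm := List.mem_of_find?_eq_some h
  simp only [pvMarkers, List.mem_cons, List.not_mem_nil, or_false] at hm
  rcases hm with h | h | h | h | h <;> subst h <;> decide

theorem altGo_nil (f : Nat) : pvAltGo f [] = [] := by cases f <;> rfl

-- B's scanner does not depend on the fuel once the fuel covers the suffix length
theorem altGo_fuel : ∀ (f₁ : Nat) (r : List Char) (f₂ : Nat),
    r.length ≤ f₁ → r.length ≤ f₂ → pvAltGo f₁ r = pvAltGo f₂ r := by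
  intro f₁
  induction f₁ with
  | zero =>
    intro r f₂ h1 _
    have hr : r = [] := List.length_eq_zero_iff.1 (by omega)
    subst hr; rw [altGo_nil, altGo_nil]
  | succ f ih =>
    intro r f₂ h1 h2
    match r with
    | [] => rw [altGo_nil, altGo_nil]
    | c :: cs =>
      match f₂ with
      | 0 => simp at h2
      | g+1 =>
        rw [pvAltGo, pvAltGo]
        cases hm : pvFindMarker (c :: cs) with
        | some m =>
          have hpos := pvFindMarker_pos hm
          simp only [hm]
          rw [ih _ g (by rw [List.length_drop]; simp only [List.length_cons] at h1 ⊢; omega)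
                      (by rw [List.length_drop]; simp only [List.length_cons] at h2 ⊢; omega)]
        | none =>
          simp only [hm]
          rw [ih cs g (by simp at h1 ⊢; omega) (by simp at h2 ⊢; omega)]

-- a prefix test is a fixed-length slice-equality test
theorem isPrefixOf_iff_take {m r : List Char} {n : Nat} (hn : m.length = n) :
    m.isPrefixOf r ↔ r.take n = m := by
  rw [List.isPrefixOf_iff_prefix, List.prefix_iff_eq_take, hn, eq_comm]

-- no marker matches a suffix that does not start with '"'
theorem pvFindMarker_none {c : Char} {cs : List Char} (hc : c ≠ '"') :
    pvFindMarker (c :: cs) = none := by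
  have hb : ('"' == c) = false := beq_eq_false_iff_ne.2 (Ne.symm hc)
  simp only [pvFindMarker, pvMarkers, pvM1, pvM2, pvM3, pvM4, pvM5, List.find?]
  simp [List.isPrefixOf, hb]

theorem go_eq (t : List Char) : ∀ (f : Nat) (i : Nat) (output : List Char), t.length ≤ i + f →
    make_parseable_go f t i output = output ++ pvAltGo (t.length - i) (t.drop i) := by
  intro f
  induction f with
  | zero =>
    intro i output hf
    have hnil : t.drop i = [] := List.drop_eq_nil_of_le (by omega)
    rw [make_parseable_go, hnil, altGo_nil, List.append_nil]
  | succ f ih =>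
    intro i output hf
    by_cases h : i < t.length
    · have hdrop : t.drop i = t[i] :: t.drop (i+1) := List.drop_eq_getElem_cons h
      have hlen : t.length - i = (t.length - i - 1) + 1 := by omega
      rw [make_parseable_go]
      simp only [h, dif_pos]
      -- unfold one step of B's scanner on the same suffix
      conv_rhs => rw [hlen, hdrop, pvAltGo, ← hdrop]
      by_cases hq : t[i] = '"'
      · simp only [hq, if_pos]
        by_cases h1: (t.drop i).take 8 = pvM1
        · have hp : pvM1.isPrefixOf (t.drop i) := (isPrefixOf_iff_take (by decide)).2 h1
          have hfm : pvFindMarker (t.drop i) = some pvM1 := by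
            simp [pvFindMarker, pvMarkers, List.find?, hp]
          rw [if_pos h1, ih _ _ (by omega)]
          simp only [hfm]
          have hdd : (t.drop i).drop pvM1.length = t.drop (i+8) := by
            rw [List.drop_drop, show pvM1.length = 8 from by decide, Nat.add_comm]
          have hfu : pvAltGo (t.length - i - 1) (t.drop (i+8)) = pvAltGo (t.length - (i+8)) (t.drop (i+8)) :=
            altGo_fuel _ _ _ (by rw [List.length_drop]; omega) (by rw [List.length_drop])
          rw [hdd, hfu, List.append_assoc]
        · rw [if_neg h1]
          have np1 : ¬ pvM1.isPrefixOf (t.drop i) := fun hp => h1 ((isPrefixOf_iff_take (by decide)).1 hp)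
          by_cases h2: (t.drop i).take 13 = pvM2
          · have hp : pvM2.isPrefixOf (t.drop i) := (isPrefixOf_iff_take (by decide)).2 h2
            have hfm : pvFindMarker (t.drop i) = some pvM2 := by
              simp [pvFindMarker, pvMarkers, List.find?, hp, np1]
            rw [if_pos h2, ih _ _ (by omega)]
            simp only [hfm]
            have hdd : (t.drop i).drop pvM2.length = t.drop (i+13) := by
              rw [List.drop_drop, show pvM2.length = 13 from by decide, Nat.add_comm]
            have hfu : pvAltGo (t.length - i - 1) (t.drop (i+13)) = pvAltGo (t.length - (i+13)) (t.drop (i+13)) :=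
              altGo_fuel _ _ _ (by rw [List.length_drop]; omega) (by rw [List.length_drop])
            rw [hdd, hfu, List.append_assoc]
          · rw [if_neg h2]
            have np2 : ¬ pvM2.isPrefixOf (t.drop i) := fun hp => h2 ((isPrefixOf_iff_take (by decide)).1 hp)
            by_cases h3: (t.drop i).take 11 = pvM3
            · have hp : pvM3.isPrefixOf (t.drop i) := (isPrefixOf_iff_take (by decide)).2 h3
              have hfm : pvFindMarker (t.drop i) = some pvM3 := by
                simp [pvFindMarker, pvMarkers, List.find?, hp, np1, np2]
              rw [if_pos h3, ih _ _ (by omega)]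
              simp only [hfm]
              have hdd : (t.drop i).drop pvM3.length = t.drop (i+11) := by
                rw [List.drop_drop, show pvM3.length = 11 from by decide, Nat.add_comm]
              have hfu : pvAltGo (t.length - i - 1) (t.drop (i+11)) = pvAltGo (t.length - (i+11)) (t.drop (i+11)) :=
                altGo_fuel _ _ _ (by rw [List.length_drop]; omega) (by rw [List.length_drop])
              rw [hdd, hfu, List.append_assoc]
            · rw [if_neg h3]
              have np3 : ¬ pvM3.isPrefixOf (t.drop i) := fun hp => h3 ((isPrefixOf_iff_take (by decide)).1 hp)
              by_cases h4: (t.drop i).take 12 = pvM4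
              · have hp : pvM4.isPrefixOf (t.drop i) := (isPrefixOf_iff_take (by decide)).2 h4
                have hfm : pvFindMarker (t.drop i) = some pvM4 := by
                  simp [pvFindMarker, pvMarkers, List.find?, hp, np1, np2, np3]
                rw [if_pos h4, ih _ _ (by omega)]
                simp only [hfm]
                have hdd : (t.drop i).drop pvM4.length = t.drop (i+12) := by
                  rw [List.drop_drop, show pvM4.length = 12 from by decide, Nat.add_comm]
                have hfu : pvAltGo (t.length - i - 1) (t.drop (i+12)) = pvAltGo (t.length - (i+12)) (t.drop (i+12)) :=
                  altGo_fuel _ _ _ (by rw [List.length_drop]; omega) (by rw [List.length_drop])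
                rw [hdd, hfu, List.append_assoc]
              · rw [if_neg h4]
                have np4 : ¬ pvM4.isPrefixOf (t.drop i) := fun hp => h4 ((isPrefixOf_iff_take (by decide)).1 hp)
                by_cases h5: (t.drop i).take 3 = pvM5
                · have hp : pvM5.isPrefixOf (t.drop i) := (isPrefixOf_iff_take (by decide)).2 h5
                  have hfm : pvFindMarker (t.drop i) = some pvM5 := by
                    simp [pvFindMarker, pvMarkers, List.find?, hp, np1, np2, np3, np4]
                  rw [if_pos h5, ih _ _ (by omega)]
                  simp only [hfm]
                  have hdd : (t.drop i).drop pvM5.length = t.drop (i+3) := by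
                    rw [List.drop_drop, show pvM5.length = 3 from by decide, Nat.add_comm]
                  have hfu : pvAltGo (t.length - i - 1) (t.drop (i+3)) = pvAltGo (t.length - (i+3)) (t.drop (i+3)) :=
                    altGo_fuel _ _ _ (by rw [List.length_drop]; omega) (by rw [List.length_drop])
                  rw [hdd, hfu, List.append_assoc]
                · rw [if_neg h5]
                  have np5 : ¬ pvM5.isPrefixOf (t.drop i) := fun hp => h5 ((isPrefixOf_iff_take (by decide)).1 hp)
                  have hfm : pvFindMarker (t.drop i) = none := by
                    simp [pvFindMarker, pvMarkers, List.find?, np1, np2, np3, np4, np5]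
                  rw [ih _ _ (by omega)]
                  simp only [hfm]
                  have hl : t.length - i - 1 = t.length - (i+1) := by omega
                  simp [hq, hl]
      · rw [if_neg hq]
        have hfm : pvFindMarker (t.drop i) = none := by
          rw [hdrop]; exact pvFindMarker_none hq
        have hl : t.length - i - 1 = t.length - (i+1) := by omega
        by_cases hb : t[i] = '\\'
        · rw [if_pos hb, ih _ _ (by omega)]
          simp only [hfm]
          simp [hb, hl]
        · rw [if_neg hb, ih _ _ (by omega)]
          simp only [hfm]
          simp [hb, hq, hl]
    · have hnil : t.drop i = [] := List.drop_eq_nil_of_le (by omega)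
      rw [make_parseable_go]
      simp [h, hnil, altGo_nil]

-- ===== VERDICT (by name: the statement is the Claim_ definition above) =====
theorem make_parseable_spec : Claim_equal_make_parseable := by
  intro t _
  unfold Spec_make_parseable make_parseable make_parseable_alt
  rw [go_eq t.toList _ 0 [] (by omega)]
  simp
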